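-- pv_equiv track=rewrite | github.com/Hackerax1/TESSA | proxmox_nli/commands/vm_command.py | _process_command_output
-- ===== SOURCE A (Python) =====
-- def _process_command_output(output, command):
--     """Process command output to remove command echo and prompts"""
--     # Remove command from the beginning if it appears there
--     output_lines = output.strip().split('\n')
--     processed_lines = []
--
--     # Skip the first line if it contains the command
--     start_idx = 0
--     if output_lines and command in output_lines[0]:
--         start_idx = 1
--
--     # Process remaining lines (remove prompt from the last line)
--     for i in range(start_idx, len(output_lines)):
--         line = output_lines[i]
--         # Skip lines containing standard shell prompts
--         if i == len(output_lines) - 1 and any(prompt in line for prompt in ['$ ', '# ', '> ']):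
--             continue
--         processed_lines.append(line)
--
--     return '\n'.join(processed_lines)
-- ===== SOURCE B (Python) =====
-- def _process_command_output(output, command):
--     """Process command output to remove command echo and prompts"""
--     def go(lines, first):
--         if not lines:
--             return []
--         head, rest = lines[0], lines[1:]
--         if first and command in head:
--             return go(rest, False)
--         if not rest and any(p in head for p in ['$ ', '# ', '> ']):
--             return []
--         return [head] + go(rest, False)
--     return '\n'.join(go(output.strip().split('\n'), True))
-- ===== Notes on version B (the rewrite author's own statement) =====
-- stated objective: alternative
-- what changed: Replaces A's index loop (with start_idx bookkeeping and an index-based last-line prompt test inside the loop) by a structural recursion over the line list carrying a first-line flag: the echo check happens at the first recursive call, the prompt check when the tail is empty, and the output is built by consing.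
import Mathlib
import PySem

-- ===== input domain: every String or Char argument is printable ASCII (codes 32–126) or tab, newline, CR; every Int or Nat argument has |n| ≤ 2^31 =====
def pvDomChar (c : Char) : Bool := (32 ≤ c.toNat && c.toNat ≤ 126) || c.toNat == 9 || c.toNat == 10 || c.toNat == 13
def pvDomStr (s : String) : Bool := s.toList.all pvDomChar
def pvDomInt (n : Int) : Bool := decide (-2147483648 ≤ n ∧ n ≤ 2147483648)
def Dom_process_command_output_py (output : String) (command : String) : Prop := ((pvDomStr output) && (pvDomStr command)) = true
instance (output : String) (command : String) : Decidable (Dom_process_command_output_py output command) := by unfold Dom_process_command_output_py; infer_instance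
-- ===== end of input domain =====

-- B replaces A's index loop by a structural recursion over the line list carrying a
-- first-line flag (echo check at the first call, prompt check when the tail is empty) —
-- objective: alternative decomposition.

-- ===== PORT A =====
-- literal port of A: split, optional skip of line 0, index loop appending all
-- lines except a prompt-bearing last line.
def process_command_output_py (output : String) (command : String) : String :=
  let output_lines := (PySem.Str.split? (PySem.Str.strip output) "\n").getD []
  let start_idx : Int :=
    if output_lines ≠ [] ∧ PySem.Str.isIn command (output_lines.headD "") = true then 1 else 0
  let processed_lines :=
    (PySem.List.pyRange start_idx (output_lines.length : Int)).foldl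
      (fun acc i =>
        let line := PySem.List.pyGetD output_lines i ""
        if i = (output_lines.length : Int) - 1 ∧
            (["$ ", "# ", "> "].any (fun p => PySem.Str.isIn p line)) = true then acc
        else acc ++ [line]) []
  PySem.Str.join "\n" processed_lines

-- ===== PORT B =====
-- any(p in head for p in ['$ ', '# ', '> '])
def pvHasPrompt (line : String) : Bool :=
  ["$ ", "# ", "> "].any (fun p => PySem.Str.isIn p line)

-- literal port of B's inner recursive helper `go(lines, first)`.
def pvGo (command : String) : List String → Bool → List String
  | [], _ => []
  | head :: rest, first =>
    if first = true ∧ PySem.Str.isIn command head = true then pvGo command rest false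
    else if rest = [] ∧ pvHasPrompt head = true then []
    else head :: pvGo command rest false

-- literal port of B: join of the recursion over the split lines.
def process_command_output_py_alt (output : String) (command : String) : String :=
  PySem.Str.join "\n" (pvGo command ((PySem.Str.split? (PySem.Str.strip output) "\n").getD []) true)

-- ===== PRECONDITION & SPEC =====
def Spec_process_command_output_py (output : String) (command : String) (out : String) : Prop := out = process_command_output_py_alt output command
instance (output : String) (command : String) (out : String) : Decidable (Spec_process_command_output_py output command out) := by unfold Spec_process_command_output_py; infer_instance

-- ===== CLAIM (what is proved, stated in full; the proofs are below) =====
def Claim_equal_process_command_output_py : Prop := ∀ (output : String) (command : String), Dom_process_command_output_py output command → Spec_process_command_output_py output command (process_command_output_py output command)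

-- ===== LEMMAS AND PROOFS =====

-- A's loop over indices s..len(ys++[l]) collects ys.drop s and then the last line unless it
-- carries a prompt.
theorem pvLoopA_eq (ys : List String) (l : String) (s : Nat) (hs : (s : Int) ≤ (ys.length : Int)) :
    (PySem.List.pyRange (s : Int) (((ys ++ [l]).length : Int))).foldl
      (fun acc i =>
        let line := PySem.List.pyGetD (ys ++ [l]) i ""
        if i = (((ys ++ [l]).length : Int)) - 1 ∧
            (["$ ", "# ", "> "].any (fun p => PySem.Str.isIn p line)) = true then acc
        else acc ++ [line]) []
    = ys.drop s ++ (if pvHasPrompt l = true then [] else [l]) := by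
  have h1 : (((ys ++ [l]).length : Int)) = (ys.length : Int) + 1 := by simp
  rw [h1, PySem.List.pyRange_one_append (s : Int) (ys.length : Int) _ hs (by omega),
    List.foldl_append, PySem.List.pyRange_one_singleton]
  have hcong :
      (PySem.List.pyRange (s : Int) (ys.length : Int)).foldl
        (fun acc i =>
          let line := PySem.List.pyGetD (ys ++ [l]) i ""
          if i = ((ys.length : Int) + 1) - 1 ∧
              (["$ ", "# ", "> "].any (fun p => PySem.Str.isIn p line)) = true then acc
          else acc ++ [line]) []
      = (PySem.List.pyRange (s : Int) (ys.length : Int)).foldl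
          (fun acc i => acc ++ [PySem.List.pyGetD ys i ""]) [] := by
    apply PySem.List.foldl_congr_mem
    intro acc i hi
    rw [PySem.List.mem_pyRange_one] at hi
    have hne : ¬ (i = ((ys.length : Int) + 1) - 1 ∧
        (["$ ", "# ", "> "].any (fun p => PySem.Str.isIn p
          (PySem.List.pyGetD (ys ++ [l]) i ""))) = true) := by
      rintro ⟨h, -⟩; omega
    simp only [hne, if_false]
    have h0 : (0 : Int) ≤ i := le_trans (by positivity) hi.1
    have hget : PySem.List.pyGetD (ys ++ [l]) i "" = PySem.List.pyGetD ys i "" := by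
      rw [PySem.List.pyGetD_eq_getElem _ _ h0 (by simp; omega),
        PySem.List.pyGetD_eq_getElem _ _ h0 (by omega),
        List.getElem_append_left]
    rw [hget]
  rw [hcong, PySem.List.foldl_append_singleton_eq_map]
  have hmap : List.map (fun i => PySem.List.pyGetD ys i "") (PySem.List.pyRange (s : Int) (ys.length : Int))
      = ys.drop s := by
    have := PySem.List.map_pyGetD_pyRange ys "" (a := (s : Int)) (by positivity)
    simpa [PySem.List.len] using this
  rw [hmap]
  have hlast : PySem.List.pyGetD (ys ++ [l]) (ys.length : Int) "" = l := by
    rw [PySem.List.pyGetD_eq_getElem _ _ (by positivity) (by simp)]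
    simp
  simp only [List.foldl_cons, List.foldl_nil, hlast, List.nil_append]
  have htrue : ((ys.length : Int) = ((ys.length : Int) + 1) - 1) := by omega
  by_cases hp : pvHasPrompt l = true
  · rw [if_pos ⟨htrue, by simpa [pvHasPrompt] using hp⟩, if_pos hp, List.append_nil]
  · rw [if_neg (fun h => hp (by simpa [pvHasPrompt] using h.2)), if_neg hp]

-- With the flag down, B's recursion keeps every line and drops a prompt-bearing last one.
theorem pvGoFalse_eq (command : String) (ys : List String) (l : String) :
    pvGo command (ys ++ [l]) false = ys ++ (if pvHasPrompt l = true then [] else [l]) := by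
  induction ys with
  | nil => simp only [List.nil_append, pvGo]; simp
  | cons y ys ih => simp only [List.cons_append, pvGo]; rw [if_neg (by simp), if_neg (by simp), ih]

-- joint lemma: A's whole pipeline after the split equals B's recursion.
theorem pvMain (ls : List String) (command : String) :
    PySem.Str.join "\n"
      ((PySem.List.pyRange
          (if ls ≠ [] ∧ PySem.Str.isIn command (ls.headD "") = true then (1 : Int) else 0)
          (ls.length : Int)).foldl
        (fun acc i =>
          let line := PySem.List.pyGetD ls i ""
          if i = (ls.length : Int) - 1 ∧
              (["$ ", "# ", "> "].any (fun p => PySem.Str.isIn p line)) = true then acc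
          else acc ++ [line]) [])
    = PySem.Str.join "\n" (pvGo command ls true) := by
  rcases List.eq_nil_or_concat ls with rfl | ⟨ys, l, rfl⟩
  · simp [PySem.List.pyRange, pvGo]
  · simp only [List.concat_eq_append]
    congr 1
    by_cases hc : PySem.Str.isIn command ((ys ++ [l]).headD "") = true
    · rw [if_pos ⟨by simp, hc⟩]
      cases ys with
      | nil =>
        rw [PySem.List.pyRange_one_eq_nil (by simp)]
        have hin' : PySem.Chars.isIn command.toList l.toList = true := by
          simpa [PySem.Str.isIn] using hc
        simp [pvGo, hin']
      | cons y ys' =>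
        have h := pvLoopA_eq (y :: ys') l 1 (by simp)
        rw [show ((1 : Nat) : Int) = (1 : Int) from rfl] at h
        simp only [] at h
        rw [h]
        have hin' : PySem.Chars.isIn command.toList y.toList = true := by
          simpa [PySem.Str.isIn] using hc
        simp [pvGo, pvGoFalse_eq, hin', pvHasPrompt]
    · rw [if_neg (fun h' => hc h'.2)]
      have h := pvLoopA_eq ys l 0 (by positivity)
      rw [show ((0 : Nat) : Int) = (0 : Int) from rfl] at h
      simp only [] at h
      rw [h, List.drop_zero]
      cases ys with
      | nil =>
        have hni' : PySem.Chars.isIn command.toList l.toList = false := by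
          simpa [PySem.Str.isIn] using Bool.not_eq_true _ ▸ hc
        simp [pvGo, hni', pvHasPrompt]
      | cons y ys' =>
        have hni' : PySem.Chars.isIn command.toList y.toList = false := by
          simpa [PySem.Str.isIn] using Bool.not_eq_true _ ▸ hc
        simp [pvGo, pvGoFalse_eq, hni', pvHasPrompt]

-- ===== VERDICT (by name: the statement is the Claim_ definition above) =====
theorem process_command_output_py_spec : Claim_equal_process_command_output_py := by
  intro output command _
  unfold Spec_process_command_output_py process_command_output_py process_command_output_py_alt
  exact pvMain _ command
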